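-- pv_equiv track=rewrite | github.com/pyrustic/mikedoc | mikedoc/browser/__init__.py | sort_class_attrs
-- ===== SOURCE A (Python) =====
-- def sort_class_attrs(attrs):
--     protected_attrs = list()
--     result = dict()
--     for attr in sorted(attrs.keys()):
--         if attr.startswith("_"):
--             protected_attrs.append(attr)
--             continue
--         result[attr] = attrs[attr]
--     for attr in protected_attrs:
--         result[attr] = attrs[attr]
--     return result
-- ===== SOURCE B (Python) =====
-- def sort_class_attrs(attrs):
--     result = dict()
--     for attr in sorted(attrs, key=lambda a: (a.startswith("_"), a)):
--         result[attr] = attrs[attr]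
--     return result
-- ===== Notes on version B (the rewrite author's own statement) =====
-- stated objective: simpler
-- what changed: Replaces the two-pass partition (separate protected-key list plus a second insertion loop) with a single pass over one sort using the composite key (startswith('_'), key), so no auxiliary list or second loop exists.
import Mathlib
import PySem

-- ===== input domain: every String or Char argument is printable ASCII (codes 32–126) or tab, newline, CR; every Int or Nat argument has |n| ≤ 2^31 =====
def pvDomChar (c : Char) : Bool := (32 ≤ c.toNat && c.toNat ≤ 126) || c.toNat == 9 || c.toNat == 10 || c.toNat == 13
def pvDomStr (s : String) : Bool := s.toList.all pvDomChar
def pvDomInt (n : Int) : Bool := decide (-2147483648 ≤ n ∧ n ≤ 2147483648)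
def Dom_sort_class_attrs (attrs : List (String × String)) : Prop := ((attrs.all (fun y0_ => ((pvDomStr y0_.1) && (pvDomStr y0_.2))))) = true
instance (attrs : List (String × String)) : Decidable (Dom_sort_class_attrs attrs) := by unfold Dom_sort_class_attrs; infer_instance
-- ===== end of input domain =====

-- B replaces A's two-pass partition (protected list + second insertion loop) with one pass over a
-- single composite-key sort; same cost, simpler shape.

-- the dict denoted by the association list (Python dict construction: later pairs overwrite, first position kept)
def pvMkDict (attrs : List (String × String)) : PySem.Dict String String :=
  attrs.foldl (fun d p => d.insert p.1 p.2) PySem.Dict.empty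

-- ===== PORT A =====
def sort_class_attrs (attrs : List (String × String)) : List (String × String) :=
  let d := pvMkDict attrs
  -- protected_attrs / result through the first loop over sorted(attrs.keys())
  let st := (PySem.List.sorted d.keys (fun a => a)).foldl
      (fun (st : List String × PySem.Dict String String) attr =>
        if PySem.Str.startswith attr "_" then (st.1 ++ [attr], st.2)
        else (st.1, st.2.insert attr (d.getD attr "")))
      ([], PySem.Dict.empty)
  -- second loop: for attr in protected_attrs: result[attr] = attrs[attr]
  (st.1.foldl (fun r attr => r.insert attr (d.getD attr "")) st.2).items

-- ===== PORT B =====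
def sort_class_attrs_alt (attrs : List (String × String)) : List (String × String) :=
  let d := pvMkDict attrs
  ((PySem.List.sorted2 d.keys (fun a => PySem.Str.startswith a "_") (fun a => a)).foldl
      (fun r attr => r.insert attr (d.getD attr "")) PySem.Dict.empty).items

-- ===== PRECONDITION & SPEC =====
def Spec_sort_class_attrs (attrs : List (String × String)) (out : List (String × String)) : Prop := out = sort_class_attrs_alt attrs
instance (attrs : List (String × String)) (out : List (String × String)) : Decidable (Spec_sort_class_attrs attrs out) := by unfold Spec_sort_class_attrs; infer_instance

-- ===== CLAIM (what is proved, stated in full; the proofs are below) =====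
def Claim_equal_sort_class_attrs : Prop := ∀ (attrs : List (String × String)), Dom_sort_class_attrs attrs → Spec_sort_class_attrs attrs (sort_class_attrs attrs)

-- ===== LEMMAS AND PROOFS =====

-- sorted2 is sorted with the lexicographic pair key (the comparators agree pointwise)
theorem pv_sorted2_eq_sorted_lex {α κ₁ κ₂ : Type} [LinearOrder κ₁] [LinearOrder κ₂]
    (xs : List α) (k1 : α → κ₁) (k2 : α → κ₂) :
    PySem.List.sorted2 xs k1 k2 = PySem.List.sorted xs (fun a => toLex (k1 a, k2 a)) := by
  rw [PySem.List.sorted_eq_foldl_insertBy]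
  show List.foldl (fun acc x => PySem.List.insertBy _ x acc) [] xs = _
  apply PySem.List.foldl_congr_mem'
  intro x _ acc
  congr 1
  funext a b
  rcases lt_trichotomy (k1 a) (k1 b) with h | h | h
  · simp [Prod.Lex.lt_iff, h]
  · simp [Prod.Lex.lt_iff, h]
  · simp [Prod.Lex.lt_iff, h, not_lt_of_gt h, ne_of_gt h]

-- a strictly key-increasing rearrangement of xs names sorted2 xs k1 k2
theorem pv_sorted2_eq_of_perm_of_pairwise {α κ₁ κ₂ : Type} [LinearOrder κ₁] [LinearOrder κ₂]
    (xs ys : List α) (k1 : α → κ₁) (k2 : α → κ₂)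
    (hperm : ys.Perm xs)
    (hpair : ys.Pairwise (fun a b => toLex (k1 a, k2 a) < toLex (k1 b, k2 b))) :
    PySem.List.sorted2 xs k1 k2 = ys := by
  rw [pv_sorted2_eq_sorted_lex]
  exact PySem.List.sorted_eq_of_perm_of_pairwise_lt xs ys _ hperm hpair

-- B's composite-key sort equals A's partition of the alphabetically sorted keys
theorem pv_partition_eq_sorted2 (keys : List String) (hnd : keys.Nodup) :
    PySem.List.sorted2 keys (fun a => PySem.Str.startswith a "_") (fun a => a) =
      (PySem.List.sorted keys (fun a => a)).filter (fun a => !PySem.Str.startswith a "_") ++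
      (PySem.List.sorted keys (fun a => a)).filter (fun a => PySem.Str.startswith a "_") := by
  have hksperm : (PySem.List.sorted keys (fun a => a)).Perm keys :=
    PySem.List.sorted_perm keys (fun a => a) false
  have hksnd : (PySem.List.sorted keys (fun a => a)).Nodup := hksperm.nodup_iff.mpr hnd
  have hkslt : (PySem.List.sorted keys (fun a => a)).Pairwise (fun a b => a < b) := by
    have h1 := PySem.List.sorted_pairwise keys (fun a => a)
    exact (h1.and hksnd).imp (fun {a b} h => lt_of_le_of_ne h.1 h.2)
  apply pv_sorted2_eq_of_perm_of_pairwise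
  · have h := List.filter_append_perm
      (fun a => !PySem.Str.startswith a "_") (PySem.List.sorted keys (fun a => a))
    simp only [Bool.not_not] at h
    exact h.trans hksperm
  · rw [List.pairwise_append]
    refine ⟨List.Pairwise.imp_of_mem ?_ (hkslt.filter _),
            List.Pairwise.imp_of_mem ?_ (hkslt.filter _), ?_⟩
    · intro a b ha hb hab
      have ha' : PySem.Chars.startswith a.toList ['_'] = false := by simpa using List.of_mem_filter ha
      have hb' : PySem.Chars.startswith b.toList ['_'] = false := by simpa using List.of_mem_filter hb
      refine Prod.Lex.lt_iff.mpr (Or.inr ?_)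
      simp [ha', hb', hab]
    · intro a b ha hb hab
      have ha' : PySem.Chars.startswith a.toList ['_'] = true := by simpa using List.of_mem_filter ha
      have hb' : PySem.Chars.startswith b.toList ['_'] = true := by simpa using List.of_mem_filter hb
      refine Prod.Lex.lt_iff.mpr (Or.inr ?_)
      simp [ha', hb', hab]
    · intro a ha b hb
      have ha' : PySem.Chars.startswith a.toList ['_'] = false := by simpa using List.of_mem_filter ha
      have hb' : PySem.Chars.startswith b.toList ['_'] = true := by simpa using List.of_mem_filter hb
      refine Prod.Lex.lt_iff.mpr (Or.inl ?_)
      simp [ha', hb']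

theorem pv_keys_nodup (attrs : List (String × String)) : (pvMkDict attrs).keys.Nodup := by
  unfold pvMkDict
  exact PySem.Dict.nodup_keys_foldl_insert_key attrs (fun p => p.1) (fun _ p => p.2)
    PySem.Dict.empty (by simp [PySem.Dict.empty, PySem.Dict.keys])

-- the first loop with its pair of accumulators: collected protected keys, and result so far
theorem pv_pairloop (d : PySem.Dict String String) (l : List String)
    (acc1 : List String) (acc2 : PySem.Dict String String) :
    List.foldl (fun (st : List String × PySem.Dict String String) attr =>
        if PySem.Str.startswith attr "_" then (st.1 ++ [attr], st.2)
        else (st.1, st.2.insert attr (d.getD attr ""))) (acc1, acc2) l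
    = (acc1 ++ l.filter (fun a => PySem.Str.startswith a "_"),
       List.foldl (fun r attr => r.insert attr (d.getD attr "")) acc2
         (l.filter (fun a => !PySem.Str.startswith a "_"))) := by
  induction l generalizing acc1 acc2 with
  | nil => simp
  | cons x t ih =>
    by_cases h : PySem.Chars.startswith x.toList ['_'] = true
    · have hstep : (if PySem.Str.startswith x "_" then
            ((acc1, acc2).1 ++ [x], (acc1, acc2).2)
          else ((acc1, acc2).1, (acc1, acc2).2.insert x (d.getD x "")))
          = (acc1 ++ [x], acc2) := by simp [h]
      rw [List.foldl_cons, hstep, ih]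
      simp [h]
    · have hstep : (if PySem.Str.startswith x "_" then
            ((acc1, acc2).1 ++ [x], (acc1, acc2).2)
          else ((acc1, acc2).1, (acc1, acc2).2.insert x (d.getD x "")))
          = (acc1, acc2.insert x (d.getD x "")) := by simp [h]
      rw [List.foldl_cons, hstep, ih]
      simp [h]

-- A's two loops over the partition equal B's single loop over the composite-key sort (dict level)
theorem pv_core (d : PySem.Dict String String) (hnd : d.keys.Nodup) :
    List.foldl (fun r attr => r.insert attr (d.getD attr ""))
      (List.foldl
        (fun (st : List String × PySem.Dict String String) attr =>
          if PySem.Str.startswith attr "_" then (st.1 ++ [attr], st.2)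
          else (st.1, st.2.insert attr (d.getD attr "")))
        ([], PySem.Dict.empty) (PySem.List.sorted d.keys (fun a => a))).2
      (List.foldl
        (fun (st : List String × PySem.Dict String String) attr =>
          if PySem.Str.startswith attr "_" then (st.1 ++ [attr], st.2)
          else (st.1, st.2.insert attr (d.getD attr "")))
        ([], PySem.Dict.empty) (PySem.List.sorted d.keys (fun a => a))).1
    = List.foldl (fun r attr => r.insert attr (d.getD attr "")) PySem.Dict.empty
        (PySem.List.sorted2 d.keys (fun a => PySem.Str.startswith a "_") (fun a => a)) := by
  rw [pv_pairloop, pv_partition_eq_sorted2 d.keys hnd, List.foldl_append]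
  simp

-- ===== VERDICT (by name: the statement is the Claim_ definition above) =====
theorem sort_class_attrs_spec : Claim_equal_sort_class_attrs := by
  intro attrs _
  unfold Spec_sort_class_attrs sort_class_attrs sort_class_attrs_alt
  exact congrArg PySem.Dict.items (pv_core (pvMkDict attrs) (pv_keys_nodup attrs))
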